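-- pv_equiv track=rewrite | github.com/Torainodor/aoc2023 | day1/calibration.py | find_forward
-- ===== SOURCE A (Python) =====
-- number_mapping = {
--     'one': 1, '1': 1,
--     'two': 2, '2': 2,
--     'three': 3, '3': 3,
--     'four': 4, '4': 4,
--     'five': 5, '5': 5,
--     'six': 6, '6': 6,
--     'seven': 7, '7': 7,
--     'eight': 8, '8': 8,
--     'nine': 9, '9': 9
-- }
--
-- def find_forward(line: str, patt: list):  # solves part 1
--     leftmost_index = len(line)
--     current_item = None
--
--     for item in patt:
--         index = line.find(item)
--         if index != -1 and (index is None or index < leftmost_index):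
--             leftmost_index = index
--             current_item = item
--
--     return str(number_mapping[str(current_item)])
-- ===== SOURCE B (Python) =====
-- number_mapping = {
--     'one': 1, '1': 1,
--     'two': 2, '2': 2,
--     'three': 3, '3': 3,
--     'four': 4, '4': 4,
--     'five': 5, '5': 5,
--     'six': 6, '6': 6,
--     'seven': 7, '7': 7,
--     'eight': 8, '8': 8,
--     'nine': 9, '9': 9
-- }
--
-- def find_forward(line: str, patt: list):
--     # scan positions left to right; at the first position where some pattern
--     # starts, take the first such pattern in patt order
--     found = None
--     for i in range(len(line)):
--         found = next((item for item in patt if line.startswith(item, i)), None)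
--         if found is not None:
--             break
--     return str(number_mapping[str(found)])
-- ===== Notes on version B (the rewrite author's own statement) =====
-- stated objective: alternative
-- what changed: A runs one full str.find per pattern and keeps the strict minimum index; B makes a single positional left-to-right scan and stops at the first position where some pattern starts, taking the first such pattern; Pre_ excludes exactly the inputs where A raises KeyError (no pattern occurs, or the winning pattern is not a number_mapping key), where B raises the identical KeyError.
import Mathlib
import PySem

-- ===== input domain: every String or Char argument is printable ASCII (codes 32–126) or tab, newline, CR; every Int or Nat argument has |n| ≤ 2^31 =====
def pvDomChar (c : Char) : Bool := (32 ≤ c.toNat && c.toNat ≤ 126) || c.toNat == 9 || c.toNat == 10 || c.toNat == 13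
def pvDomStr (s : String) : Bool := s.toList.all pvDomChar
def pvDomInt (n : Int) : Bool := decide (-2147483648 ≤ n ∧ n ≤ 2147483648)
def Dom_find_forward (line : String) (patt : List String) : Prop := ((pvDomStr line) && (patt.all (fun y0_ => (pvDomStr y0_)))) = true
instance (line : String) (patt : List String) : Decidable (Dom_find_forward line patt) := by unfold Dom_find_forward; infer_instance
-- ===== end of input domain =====

-- B replaces A's one-full-str.find-per-pattern minimum scan by a single positional
-- left-to-right scan that stops at the first position where some pattern starts
-- (alternative structure, same values; Pre_ excludes exactly the KeyError inputs).

def numberMapping : PySem.Dict String Int :=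
  PySem.Dict.ofList [("one",1),("1",1),("two",2),("2",2),("three",3),("3",3),
    ("four",4),("4",4),("five",5),("5",5),("six",6),("6",6),
    ("seven",7),("7",7),("eight",8),("8",8),("nine",9),("9",9)]

-- str(x) for x : Optional[str]
def pyStrOfOptStr : Option String → String
  | none => "None"
  | some s => s

-- return str(number_mapping[str(x)]); Python raises KeyError when the key is
-- absent — exactly those inputs are excluded by Pre_find_forward ("" is a dummy there)
def lookupStr (x : Option String) : String :=
  match numberMapping.get? (pyStrOfOptStr x) with
  | some v => PySem.Int.toStr v
  | none => ""

-- ===== PORT A =====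
-- the loop body of A: compare line.find(item) with the current leftmost;
-- the Python's 'index is None' is constant-false and transliterated away
def stepA (line : String) (s : Int × Option String) (item : String) : Int × Option String :=
  let index := PySem.Str.find line item
  if index ≠ -1 ∧ index < s.1 then (index, some item) else s

def find_forward (line : String) (patt : List String) : String :=
  let st := patt.foldl (stepA line) ((line.toList.length : Int), none)
  lookupStr st.2

-- ===== PORT B =====
-- line.startswith(item, i) for 0 ≤ i < len(line)
def matchAt (line : String) (item : String) (i : Nat) : Bool :=
  PySem.Chars.startswith (line.toList.drop i) item.toList

-- the outer 'for i in range(len(line))' loop with its break; the inner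
-- next((item for item in patt if …), None) is List.find?
def scanB (line : String) (patt : List String) (i : Nat) : Option String :=
  if _h : i < line.toList.length then
    match patt.find? (fun item => matchAt line item i) with
    | some item => some item
    | none => scanB line patt (i + 1)
  else none
termination_by line.toList.length - i
decreasing_by have hL : line.toList.length = line.length := String.length_toList; omega

def find_forward_alt (line : String) (patt : List String) : String :=
  lookupStr (scanB line patt 0)

-- ===== PRECONDITION & SPEC =====
-- Pre_ holds exactly when A returns normally: some pattern occurs in line, and the
-- winner (pattern with the leftmost occurrence, first in patt on a tie) is a key of
-- number_mapping; on all other inputs A (and B alike) raises KeyError.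
def Pre_find_forward (line : String) (patt : List String) : Prop :=
  ∃ i < line.toList.length, ∃ k < patt.length,
    matchAt line (patt.getD k "") i = true ∧
    (∀ j < i, ∀ p ∈ patt, matchAt line p j = false) ∧
    (∀ k' < k, matchAt line (patt.getD k' "") i = false) ∧
    numberMapping.contains (patt.getD k "") = true

instance (line : String) (patt : List String) : Decidable (Pre_find_forward line patt) := by
  unfold Pre_find_forward; infer_instance

def pvWitness_find_forward : String × List String := ("a1", ["1"])

def Spec_find_forward (line : String) (patt : List String) (out : String) : Prop := out = find_forward_alt line patt
instance (line : String) (patt : List String) (out : String) : Decidable (Spec_find_forward line patt out) := by unfold Spec_find_forward; infer_instance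

-- ===== CLAIM (what is proved, stated in full; the proofs are below) =====
def Claim_equal_find_forward : Prop := ∀ (line : String) (patt : List String), Dom_find_forward line patt → Pre_find_forward line patt → Spec_find_forward line patt (find_forward line patt)

-- ===== LEMMAS AND PROOFS =====

theorem matchAt_iff (line item : String) (i : Nat) :
    matchAt line item i = true ↔ item.toList <+: line.toList.drop i := by
  simp [matchAt, PySem.Chars.startswith_iff]

theorem matchAt_eq_false_iff (line item : String) (i : Nat) :
    matchAt line item i = false ↔ ¬ item.toList <+: line.toList.drop i := by
  rw [← matchAt_iff, ← Bool.not_eq_true]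

-- B's scan reaches the first matching position
theorem scanB_reach (line : String) (patt : List String) (i₀ : Nat) (w : String)
    (hi : i₀ < line.toList.length)
    (hfind : patt.find? (fun item => matchAt line item i₀) = some w) :
    ∀ m, m ≤ i₀ →
      (∀ j, m ≤ j → j < i₀ → patt.find? (fun item => matchAt line item j) = none) →
      scanB line patt m = some w := by
  intro m
  induction hd : i₀ - m generalizing m with
  | zero =>
    intro hm _
    have : m = i₀ := by omega
    subst this
    rw [scanB, dif_pos hi, hfind]
  | succ k ih =>
    intro hm hnone
    have hmlt : m < i₀ := by omega
    rw [scanB, dif_pos (by omega : m < line.toList.length),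
      hnone m le_rfl hmlt]
    exact ih (m + 1) (by omega) (by omega) (fun j hj hj' => hnone j (by omega) hj')

-- A's fold: no step fires when nothing beats the current leftmost
theorem foldA_no_accept (line : String) (ps : List String) (l : Int) (c : Option String)
    (h : ∀ p ∈ ps, ¬ (PySem.Str.find line p ≠ -1 ∧ PySem.Str.find line p < l)) :
    ps.foldl (stepA line) (l, c) = (l, c) := by
  induction ps with
  | nil => rfl
  | cons p ps ih =>
    have hstep : stepA line (l, c) p = (l, c) := by
      simp only [stepA]
      rw [if_neg (h p (List.mem_cons_self))]
    rw [List.foldl_cons, hstep]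
    exact ih (fun q hq => h q (List.mem_cons_of_mem _ hq))

-- A's fold over patterns whose find index is -1 or beyond i₀ keeps leftmost above i₀
theorem foldA_pre (line : String) (i₀ : Nat) (ps : List String)
    (h : ∀ p ∈ ps, PySem.Str.find line p = -1 ∨ (i₀ : Int) < PySem.Str.find line p) :
    ∀ (l : Int) (c : Option String), (i₀ : Int) < l →
      (i₀ : Int) < (ps.foldl (stepA line) (l, c)).1 := by
  induction ps with
  | nil => intro l c hl; simpa using hl
  | cons p ps ih =>
    intro l c hl
    rw [List.foldl_cons]
    by_cases hp : PySem.Str.find line p ≠ -1 ∧ PySem.Str.find line p < l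
    · have hstep : stepA line (l, c) p = (PySem.Str.find line p, some p) := by
        simp only [stepA]
        rw [if_pos hp]
      rw [hstep]
      rcases h p List.mem_cons_self with h1 | h1
      · exact absurd h1 hp.1
      · exact ih (fun q hq => h q (List.mem_cons_of_mem _ hq)) _ _ h1
    · have hstep : stepA line (l, c) p = (l, c) := by
        simp only [stepA]
        rw [if_neg hp]
      rw [hstep]
      exact ih (fun q hq => h q (List.mem_cons_of_mem _ hq)) l c hl

-- one accepted step of A's fold
theorem foldA_step (line : String) (s : Int × Option String) (item : String)
    (h : PySem.Str.find line item ≠ -1 ∧ PySem.Str.find line item < s.1) :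
    stepA line s item = (PySem.Str.find line item, some item) := by
  simp only [stepA]
  rw [if_pos h]

-- every pattern is found at -1 or at/after i₀ when nothing matches before i₀
theorem find_ge_of_min (line p : String) (i₀ : Nat)
    (hmin : ∀ j < i₀, matchAt line p j = false) :
    PySem.Str.find line p = -1 ∨ (i₀ : Int) ≤ PySem.Str.find line p := by
  rw [PySem.Str.find_eq]
  by_cases hne : PySem.Chars.find line.toList p.toList = -1
  · exact Or.inl hne
  · right
    have hle := PySem.Chars.neg_one_le_find (s := line.toList) (sub := p.toList)
    have h0 : 0 ≤ PySem.Chars.find line.toList p.toList := by omega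
    have hspec := PySem.Chars.find_spec (s := line.toList) (sub := p.toList) h0
    by_contra hlt
    have hj : (PySem.Chars.find line.toList p.toList).toNat < i₀ := by omega
    exact ((matchAt_eq_false_iff line p _).mp (hmin _ hj)) hspec.1

-- a pattern that does not start at i₀ is not found at i₀
theorem find_ne_at (line p : String) (i₀ : Nat) (hnot : matchAt line p i₀ = false) :
    PySem.Str.find line p ≠ (i₀ : Int) := by
  intro heq
  rw [PySem.Str.find_eq] at heq
  have h0 : 0 ≤ PySem.Chars.find line.toList p.toList := by
    rw [heq]; exact Int.natCast_nonneg i₀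
  have hspec := PySem.Chars.find_spec (s := line.toList) (sub := p.toList) h0
  have ht : (PySem.Chars.find line.toList p.toList).toNat = i₀ := by omega
  exact ((matchAt_eq_false_iff line p i₀).mp hnot) (ht ▸ hspec.1)

-- the winner's find index is exactly i₀
theorem find_eq_of_win (line w : String) (i₀ : Nat)
    (hw : matchAt line w i₀ = true)
    (hmin : ∀ j < i₀, matchAt line w j = false) :
    PySem.Str.find line w = (i₀ : Int) := by
  rw [PySem.Str.find_eq]
  have hpre := (matchAt_iff line w i₀).mp hw
  have hisin : PySem.Chars.isIn w.toList line.toList = true := by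
    rw [← PySem.Chars.exists_prefix_drop_iff_isIn]; exact ⟨i₀, hpre⟩
  have hne : PySem.Chars.find line.toList w.toList ≠ -1 := by
    rw [PySem.Chars.find_ne_neg_one_iff, ← PySem.Chars.isIn_iff_infix]; exact hisin
  have hle := PySem.Chars.neg_one_le_find (s := line.toList) (sub := w.toList)
  have h0 : 0 ≤ PySem.Chars.find line.toList w.toList := by omega
  have hspec := PySem.Chars.find_spec (s := line.toList) (sub := w.toList) h0
  have h1 : ¬ (PySem.Chars.find line.toList w.toList).toNat < i₀ := fun hj =>
    ((matchAt_eq_false_iff line w _).mp (hmin _ hj)) hspec.1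
  have h2 : ¬ i₀ < (PySem.Chars.find line.toList w.toList).toNat := fun hj =>
    (hspec.2 i₀ hj) hpre
  omega

-- find? returns the element at the first index where the predicate holds
theorem find?_first {α : Type} (p : α → Bool) (l : List α) (d : α) (k : Nat)
    (hk : k < l.length) (h1 : p (l.getD k d) = true)
    (h2 : ∀ k' < k, p (l.getD k' d) = false) :
    l.find? p = some (l.getD k d) := by
  induction l generalizing k with
  | nil => simp at hk
  | cons a l ih =>
    cases k with
    | zero =>
      simp only [List.getD_cons_zero] at h1 ⊢
      rw [List.find?_cons_of_pos h1]
    | succ k =>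
      have ha : p a = false := by simpa using h2 0 (Nat.succ_pos k)
      rw [List.find?_cons_of_neg (by simp [ha])]
      simp only [List.getD_cons_succ] at h1 ⊢
      exact ih k (by simpa using hk) h1 (fun k' hk' => by simpa using h2 (k' + 1) (by omega))

-- a member of take k₀ sits at some index below k₀
theorem mem_take_exists (patt : List String) (k₀ : Nat) (p : String)
    (hp : p ∈ patt.take k₀) :
    ∃ k' < k₀, k' < patt.length ∧ patt.getD k' "" = p := by
  obtain ⟨i, hi, hig⟩ := List.getElem_of_mem hp
  have hil : i < k₀ ∧ i < patt.length := by
    simp only [List.length_take] at hi; omega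
  refine ⟨i, hil.1, hil.2, ?_⟩
  rw [List.getD_eq_getElem _ _ hil.2, ← hig, List.getElem_take]

-- ===== VERDICT (by name: the statement is the Claim_ definition above) =====
theorem find_forward_spec : Claim_equal_find_forward := by
  intro line patt _ hpre
  obtain ⟨i₀, hi, k₀, hk, hw, hmin, hfirst, _⟩ := hpre
  unfold Spec_find_forward find_forward find_forward_alt
  -- B side
  have hfindsome : patt.find? (fun item => matchAt line item i₀) = some (patt.getD k₀ "") :=
    find?_first _ patt "" k₀ hk hw hfirst
  have hB : scanB line patt 0 = some (patt.getD k₀ "") :=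
    scanB_reach line patt i₀ _ hi hfindsome 0 (Nat.zero_le _)
      (fun j _ hj => List.find?_eq_none.mpr (fun x hx => by simp [hmin j hj x hx]))
  -- A side
  have hwmem : patt.getD k₀ "" ∈ patt := by
    rw [List.getD_eq_getElem _ _ hk]; exact List.getElem_mem hk
  have hfw : PySem.Str.find line (patt.getD k₀ "") = (i₀ : Int) :=
    find_eq_of_win line _ i₀ hw (fun j hj => hmin j hj _ hwmem)
  have hge : ∀ p ∈ patt, PySem.Str.find line p = -1 ∨ (i₀ : Int) ≤ PySem.Str.find line p :=
    fun p hp => find_ge_of_min line p i₀ (fun j hj => hmin j hj p hp)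
  have hsplit : patt = patt.take k₀ ++ patt.getD k₀ "" :: patt.drop (k₀ + 1) := by
    conv_lhs => rw [← List.take_append_drop k₀ patt]
    rw [List.drop_eq_getElem_cons hk, List.getD_eq_getElem _ _ hk]
  have hApre : (i₀ : Int) <
      ((patt.take k₀).foldl (stepA line) ((line.toList.length : Int), none)).1 := by
    refine foldA_pre line i₀ _ (fun p hp => ?_) _ none (by exact_mod_cast hi)
    obtain ⟨k', hk', hk'len, hkp⟩ := mem_take_exists patt k₀ p hp
    have hne := find_ne_at line p i₀ (hkp ▸ hfirst k' hk')
    rcases hge p (List.mem_of_mem_take hp) with h | h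
    · exact Or.inl h
    · right; omega
  have hfoldA : patt.foldl (stepA line) ((line.toList.length : Int), none)
      = ((i₀ : Int), some (patt.getD k₀ "")) := by
    conv_lhs => rw [hsplit]
    rw [List.foldl_append, List.foldl_cons,
      foldA_step line _ _ ⟨by rw [hfw]; omega, by rw [hfw]; exact hApre⟩, hfw]
    refine foldA_no_accept line _ _ _ (fun p hp => ?_)
    rintro ⟨hne, hlt⟩
    rcases hge p (List.mem_of_mem_drop hp) with h | h
    · exact hne h
    · omega
  show lookupStr (patt.foldl (stepA line) ((line.toList.length : Int), none)).2
      = lookupStr (scanB line patt 0)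
  rw [hfoldA, hB]
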